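-- pv_equiv track=rewrite | github.com/daniel-reich/ubiquitous-fiesta | djJpmZPPBx3JaAqcK_7.py | maya_number
-- ===== SOURCE A (Python) =====
-- def maya_number(n):
--   if n == 0:
--     lst = [0]
--   else:
--     lst = []
--   while n > 0:
--     lst.append(n % 20)
--     n = n // 20
--   lst = lst[::-1]
--   maya = {0:'@',1:'o',2:'oo',3:'ooo',4:'oooo',5:'-',6:'o-',7:'oo-',8:'ooo-',9:'oooo-',10:'--',11:'o--',12:'oo--',13:'ooo--',14:'oooo--',15:'---',16:'o---',17:'oo---',18:'ooo---',19:'oooo---'}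
--   return [maya[i] for i in lst]
-- ===== SOURCE B (Python) =====
-- def maya_number(n):
--     def sym(d):
--         return '@' if d == 0 else 'o' * (d % 5) + '-' * (d // 5)
--
--     def digits(m):
--         if m <= 0:
--             return []
--         return digits(m // 20) + [sym(m % 20)]
--
--     if n == 0:
--         return ['@']
--     return digits(n)
-- ===== Notes on version B (the rewrite author's own statement) =====
-- stated objective: alternative
-- what changed: Replaces the LSB-first while-loop with list reversal and a twenty-entry lookup table by a most-significant-digit-first recursion whose glyph for each digit is computed from a closed-form formula (dots from the remainder by five, bars from the quotient).
import Mathlib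
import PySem

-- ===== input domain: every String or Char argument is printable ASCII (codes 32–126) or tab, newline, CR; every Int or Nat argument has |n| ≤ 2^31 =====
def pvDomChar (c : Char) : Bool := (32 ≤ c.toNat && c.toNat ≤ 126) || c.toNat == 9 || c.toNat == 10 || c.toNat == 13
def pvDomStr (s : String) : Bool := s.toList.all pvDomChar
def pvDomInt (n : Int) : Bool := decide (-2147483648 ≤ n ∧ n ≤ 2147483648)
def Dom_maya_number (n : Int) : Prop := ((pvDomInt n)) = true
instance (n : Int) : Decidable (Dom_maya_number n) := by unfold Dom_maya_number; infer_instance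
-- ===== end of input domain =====

-- B replaces A's LSB-first while loop + reversal + 20-entry table by an MSB-first
-- recursion with a closed-form glyph formula (objective: alternative decomposition).

-- ===== PORT A =====
-- Python's dict literal {0:'@',…,19:'oooo---'} as an insertion-ordered association dict.
def mayaTable : PySem.Dict Int String :=
  PySem.Dict.ofList [(0, "@"), (1, "o"), (2, "oo"), (3, "ooo"), (4, "oooo"),
    (5, "-"), (6, "o-"), (7, "oo-"), (8, "ooo-"), (9, "oooo-"),
    (10, "--"), (11, "o--"), (12, "oo--"), (13, "ooo--"), (14, "oooo--"),
    (15, "---"), (16, "o---"), (17, "oo---"), (18, "ooo---"), (19, "oooo---")]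

-- the while loop: while n > 0: lst.append(n % 20); n = n // 20
def mayaLoop (n : Int) (lst : List Int) : List Int :=
  if h : n > 0 then
    mayaLoop (PySem.Int.floordiv n 20) (lst ++ [PySem.Int.mod n 20])
  else lst
termination_by n.toNat
decreasing_by
  have h2 : PySem.Int.floordiv n 20 = n / 20 := PySem.Int.floordiv_eq_ediv_of_pos (by omega)
  rw [h2]; omega

def maya_number (n : Int) : List String :=
  let lst : List Int := if n == 0 then [0] else []
  let lst := mayaLoop n lst
  let lst := (PySem.List.slice? lst none none (-1)).getD []  -- lst[::-1]; step = -1 ≠ 0 so slice? is always some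
  -- maya[i]: KeyError is impossible here since every produced digit is in 0..19,
  -- so the lookup's default is never returned.
  lst.map (fun i => (mayaTable.get? i).getD "")

-- ===== PORT B =====
-- 'o' * (d % 5) + '-' * (d // 5); d is a digit 0..19, so plain replicate is exact here
def mayaSym (d : Int) : String :=
  if d == 0 then "@"
  else String.mk (List.replicate (PySem.Int.mod d 5).toNat 'o')
       ++ String.mk (List.replicate (PySem.Int.floordiv d 5).toNat '-')

def mayaDigits (m : Int) : List String :=
  if h : m ≤ 0 then []
  else mayaDigits (PySem.Int.floordiv m 20) ++ [mayaSym (PySem.Int.mod m 20)]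
termination_by m.toNat
decreasing_by
  have h2 : PySem.Int.floordiv m 20 = m / 20 := PySem.Int.floordiv_eq_ediv_of_pos (by omega)
  rw [h2]; omega

def maya_number_alt (n : Int) : List String :=
  if n == 0 then ["@"] else mayaDigits n

-- ===== PRECONDITION & SPEC =====
def Spec_maya_number (n : Int) (out : List String) : Prop := out = maya_number_alt n
instance (n : Int) (out : List String) : Decidable (Spec_maya_number n out) := by unfold Spec_maya_number; infer_instance

-- ===== CLAIM (what is proved, stated in full; the proofs are below) =====
def Claim_equal_maya_number : Prop := ∀ (n : Int), Dom_maya_number n → Spec_maya_number n (maya_number n)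

-- ===== LEMMAS AND PROOFS =====

-- the pure (no-accumulator) digit list of A's loop, LSB first
def mayaPure (n : Int) : List Int :=
  if h : n > 0 then PySem.Int.mod n 20 :: mayaPure (PySem.Int.floordiv n 20) else []
termination_by n.toNat
decreasing_by
  have h2 : PySem.Int.floordiv n 20 = n / 20 := PySem.Int.floordiv_eq_ediv_of_pos (by omega)
  rw [h2]; omega

theorem mayaLoop_eq_append (n : Int) (lst : List Int) :
    mayaLoop n lst = lst ++ mayaPure n := by
  induction n, lst using mayaLoop.induct with
  | case1 n lst h ih =>
    rw [mayaLoop, mayaPure]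
    simp only [h, dite_true]
    rw [ih]
    simp
  | case2 n lst h =>
    rw [mayaLoop, mayaPure]
    simp [h]

theorem table_eq_sym (d : Int) (h0 : 0 ≤ d) (h1 : d < 20) :
    (mayaTable.get? d).getD "" = mayaSym d := by
  interval_cases d <;> decide

theorem rev_map_pure (n : Int) (hn : 0 < n) :
    ((mayaPure n).reverse).map (fun i => (mayaTable.get? i).getD "") = mayaDigits n := by
  induction n using mayaPure.induct with
  | case1 n h ih =>
    have hfe : PySem.Int.floordiv n 20 = n / 20 := PySem.Int.floordiv_eq_ediv_of_pos (by omega)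
    rw [mayaPure, mayaDigits]
    simp only [h, dite_true]
    have hne : ¬ n ≤ 0 := by omega
    simp only [hne, dite_false, List.reverse_cons, List.map_append, List.map_cons, List.map_nil]
    have hsym := table_eq_sym (PySem.Int.mod n 20)
      (by rw [PySem.Int.mod_eq_emod_of_pos (by omega)]; exact Int.emod_nonneg n (by omega))
      (by rw [PySem.Int.mod_eq_emod_of_pos (by omega)]; exact Int.emod_lt_of_pos n (by omega))
    rw [hsym]
    by_cases hq : 0 < PySem.Int.floordiv n 20
    · rw [ih hq]
    · have hq' : PySem.Int.floordiv n 20 ≤ 0 := by rw [hfe] at hq ⊢; omega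
      have hp1 : mayaPure (PySem.Int.floordiv n 20) = [] := by
        rw [mayaPure]; simp only [dite_eq_right_iff]; intro hc; omega
      have hp2 : mayaDigits (PySem.Int.floordiv n 20) = [] := by
        rw [mayaDigits, dif_pos hq']
      rw [hp1, hp2]; simp
  | case2 n h => omega

-- ===== VERDICT (by name: the statement is the Claim_ definition above) =====
theorem maya_number_spec : Claim_equal_maya_number := by
  intro n _
  unfold Spec_maya_number maya_number maya_number_alt
  by_cases h0 : n = 0
  · subst h0
    simp only [beq_self_eq_true, if_true]
    rw [show mayaLoop (0:Int) [0] = [0] by rw [mayaLoop]; simp,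
        PySem.List.slice?_none_none_neg_one, Option.getD_some]
    decide
  · simp only [beq_iff_eq, h0, if_false]
    rw [mayaLoop_eq_append, List.nil_append, PySem.List.slice?_none_none_neg_one, Option.getD_some]
    by_cases hp : 0 < n
    · exact rev_map_pure n hp
    · rw [show mayaPure n = [] from by rw [mayaPure]; simp only [dite_eq_right_iff]; intro hc; omega,
          show mayaDigits n = [] from by rw [mayaDigits]; simp [show n ≤ 0 by omega]]
      simp
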